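-- pv_equiv track=rewrite | github.com/cosmograph-org/py_cosmograph | cosmograph/datasrc/minidot.py | source_target_pairs_to_graph_jdict
-- ===== SOURCE A (Python) =====
-- from typing import Iterable
--
-- def source_target_pairs_to_graph_jdict(source_target_pairs: Iterable):
--     nodes = []
--     links = []
--     _nodes = set(nodes)
--
--     def add_node_if_not_already_there(node):
--         if node not in _nodes:
--             nodes.append(node)
--             _nodes.add(node)
--
--     for source, target in source_target_pairs:
--         add_node_if_not_already_there(source)
--         add_node_if_not_already_there(target)
--         links.append({"source": source, "target": target})
--
--     return {
--         "nodes": [{"id": node} for node in nodes],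
--         "links": links
--     }
-- ===== SOURCE B (Python) =====
-- def first_seen(xs):
--     if not xs:
--         return []
--     head, rest = xs[0], xs[1:]
--     return [head] + first_seen([y for y in rest if y != head])
--
--
-- def source_target_pairs_to_graph_jdict(source_target_pairs):
--     pairs = list(source_target_pairs)
--     flat = [x for s, t in pairs for x in (s, t)]
--     return {"nodes": [{"id": n} for n in first_seen(flat)],
--             "links": [{"source": s, "target": t} for s, t in pairs]}
-- ===== Notes on version B (the rewrite author's own statement) =====
-- stated objective: alternative
-- what changed: Replaces the incremental seen-set bookkeeping with a recursive dedup (first_seen) that keeps each head and deletes all its later duplicates from the rest, applied to the flattened source/target stream; no set or dict is maintained at all.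
import Mathlib
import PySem

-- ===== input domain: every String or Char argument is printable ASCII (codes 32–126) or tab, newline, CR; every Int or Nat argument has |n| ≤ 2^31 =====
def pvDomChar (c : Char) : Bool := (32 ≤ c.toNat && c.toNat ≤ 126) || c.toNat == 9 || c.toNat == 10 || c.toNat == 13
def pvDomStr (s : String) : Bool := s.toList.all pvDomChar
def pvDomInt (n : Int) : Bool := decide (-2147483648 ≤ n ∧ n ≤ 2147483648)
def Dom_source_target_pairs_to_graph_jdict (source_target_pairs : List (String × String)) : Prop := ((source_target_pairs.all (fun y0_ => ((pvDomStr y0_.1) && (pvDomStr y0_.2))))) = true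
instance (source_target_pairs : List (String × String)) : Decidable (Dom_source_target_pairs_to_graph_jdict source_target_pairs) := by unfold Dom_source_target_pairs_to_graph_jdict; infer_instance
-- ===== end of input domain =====

-- B drops A's incremental seen-set bookkeeping: it flattens the pairs and dedups the
-- stream with a recursive first_seen that keeps each head and deletes its later
-- duplicates from the rest (objective: alternative; same result, no set maintained).

-- ===== PORT A =====
-- the 'add_node_if_not_already_there' closure: acts on the (nodes, _nodes) pair
def pvAddNode (nodes : List String) (ns : PySem.Set String) (node : String) :
    List String × PySem.Set String :=
  if ns.contains node then (nodes, ns) else (nodes ++ [node], PySem.Set.add ns node)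

-- one iteration of A's for-loop over (nodes, _nodes, links)
def pvStepA (st : List String × PySem.Set String × List (List (String × String)))
    (p : String × String) : List String × PySem.Set String × List (List (String × String)) :=
  let (nodes, ns, links) := st
  let (nodes, ns) := pvAddNode nodes ns p.1
  let (nodes, ns) := pvAddNode nodes ns p.2
  (nodes, ns, links ++ [[("source", p.1), ("target", p.2)]])

def source_target_pairs_to_graph_jdict (source_target_pairs : List (String × String)) :
    List (String × List (List (String × String))) :=
  let st := source_target_pairs.foldl pvStepA ([], PySem.Set.empty, [])
  [("nodes", st.1.map (fun node => [("id", node)])), ("links", st.2.2)]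

-- ===== PORT B =====
-- first_seen: keep the head, recurse on the rest with the head's duplicates removed
def pvFirstSeen : List String → List String
  | [] => []
  | x :: xs => x :: pvFirstSeen (xs.filter (fun y => y ≠ x))
termination_by l => l.length
decreasing_by
  simp only [List.length_unattach]
  exact Nat.lt_succ_of_le (Nat.le_trans (List.length_filter_le _ _) (by simp))

def source_target_pairs_to_graph_jdict_alt (source_target_pairs : List (String × String)) :
    List (String × List (List (String × String))) :=
  let flat := source_target_pairs.flatMap (fun p => [p.1, p.2])
  [("nodes", (pvFirstSeen flat).map (fun n => [("id", n)])),
   ("links", source_target_pairs.map (fun p => [("source", p.1), ("target", p.2)]))]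

-- ===== PRECONDITION & SPEC =====
def Spec_source_target_pairs_to_graph_jdict (source_target_pairs : List (String × String)) (out : List (String × List (List (String × String)))) : Prop := out = source_target_pairs_to_graph_jdict_alt source_target_pairs
instance (source_target_pairs : List (String × String)) (out : List (String × List (List (String × String)))) : Decidable (Spec_source_target_pairs_to_graph_jdict source_target_pairs out) := by unfold Spec_source_target_pairs_to_graph_jdict; infer_instance

-- ===== CLAIM (what is proved, stated in full; the proofs are below) =====
def Claim_equal_source_target_pairs_to_graph_jdict : Prop := ∀ (source_target_pairs : List (String × String)), Dom_source_target_pairs_to_graph_jdict source_target_pairs → Spec_source_target_pairs_to_graph_jdict source_target_pairs (source_target_pairs_to_graph_jdict source_target_pairs)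

-- ===== LEMMAS AND PROOFS =====

-- A's loop, started from a state whose nodes list and set coincide, keeps them equal
-- and computes exactly the Set.add-fold over the flattened (source, target) stream.
theorem pvLoopA_eq (ps : List (String × String)) (acc : List String)
    (links : List (List (String × String))) :
    ps.foldl pvStepA (acc, acc, links) =
      (ps.foldl (fun a p => PySem.Set.add (PySem.Set.add a p.1) p.2) acc,
       ps.foldl (fun a p => PySem.Set.add (PySem.Set.add a p.1) p.2) acc,
       links ++ ps.map (fun p => [("source", p.1), ("target", p.2)])) := by
  induction ps generalizing acc links with
  | nil => simp
  | cons p ps ih =>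
      have hstep : pvStepA (acc, acc, links) p =
          (PySem.Set.add (PySem.Set.add acc p.1) p.2,
           PySem.Set.add (PySem.Set.add acc p.1) p.2,
           links ++ [[("source", p.1), ("target", p.2)]]) := by
        simp [pvStepA, pvAddNode, PySem.Set.add]
        split_ifs <;> simp_all [PySem.Set.add]
      simp [List.foldl, hstep, ih]

-- folding Set.add over the flattened two-element stream = folding the paired step
theorem pvFoldl_flat (ps : List (String × String)) (acc : List String) :
    ((ps.flatMap (fun p => [p.1, p.2])).foldl PySem.Set.add acc) =
      ps.foldl (fun a p => PySem.Set.add (PySem.Set.add a p.1) p.2) acc := by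
  induction ps generalizing acc with
  | nil => rfl
  | cons p ps ih => simp [List.foldl, ih]

-- unfolding lemma for pvFirstSeen on a cons (its WF equation, stated attach-free)
theorem pvFirstSeen_cons (x : String) (xs : List String) :
    pvFirstSeen (x :: xs) = x :: pvFirstSeen (xs.filter (fun y => y ≠ x)) := by
  conv_lhs => rw [pvFirstSeen.eq_def]

-- the Set.add-fold keeps the accumulator as a prefix and appends first_seen of the
-- not-yet-seen part of the stream
theorem pvFold_add_eq_firstSeen (l : List String) (acc : List String) :
    l.foldl PySem.Set.add acc =
      acc ++ pvFirstSeen (l.filter (fun y => !(acc.contains y))) := by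
  induction l generalizing acc with
  | nil => simp [pvFirstSeen]
  | cons x xs ih =>
      by_cases hx : acc.contains x
      all_goals simp only [List.contains_eq_mem] at hx
      · have h1 : PySem.Set.add acc x = acc := by
          simp [PySem.Set.add, PySem.Set.contains, List.contains_eq_mem, hx]
        have h2 : (x :: xs).filter (fun y => !(acc.contains y)) =
            xs.filter (fun y => !(acc.contains y)) := by simp [hx]
        simp only [List.foldl_cons, h1, h2, ih]
      · have h1 : PySem.Set.add acc x = acc ++ [x] := by
          simp [PySem.Set.add, PySem.Set.contains, List.contains_eq_mem, hx]
        have h2 : (x :: xs).filter (fun y => !(acc.contains y)) =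
            x :: xs.filter (fun y => !(acc.contains y)) := by simp [hx]
        have h3 : (xs.filter (fun y => !(acc.contains y))).filter (fun y => y ≠ x) =
            xs.filter (fun y => !((acc ++ [x]).contains y)) := by
          rw [List.filter_filter]
          apply List.filter_congr
          intro y _
          by_cases hy : y = x <;> simp [hy, List.contains_eq_mem, hx]
        rw [List.foldl_cons, h1, ih, h2, pvFirstSeen_cons, h3]
        simp

-- ===== VERDICT (by name: the statement is the Claim_ definition above) =====
theorem source_target_pairs_to_graph_jdict_spec : Claim_equal_source_target_pairs_to_graph_jdict := by
  intro ps _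
  unfold Spec_source_target_pairs_to_graph_jdict
  unfold source_target_pairs_to_graph_jdict source_target_pairs_to_graph_jdict_alt
  have hA := pvLoopA_eq ps [] []
  have hF := pvFold_add_eq_firstSeen (ps.flatMap (fun p => [p.1, p.2])) []
  rw [pvFoldl_flat] at hF
  simp only [List.contains_nil, Bool.not_false, List.filter_true, List.nil_append] at hF
  simp only [PySem.Set.empty, hA, hF]
  simp
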